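-- pv_equiv track=rewrite | github.com/Avhishek-Banjara/Vuln | vuln/vuln.py | find_forms
-- ===== SOURCE A (Python) =====
-- def find_forms(html):
--     # Minimal form detection (beginner-friendly)
--     forms = []
--     pos = 0
--     lower = html.lower()
--     while True:
--         idx = lower.find("<form", pos)
--         if idx == -1:
--             break
--         end = lower.find(">", idx)
--         if end == -1:
--             break
--         # find form end
--         close = lower.find("</form>", end)
--         if close == -1:
--             form_html = html[idx:end+1]
--             pos = end+1
--         else:
--             form_html = html[idx:close+7]
--             pos = close + 7
--         forms.append(form_html)
--     return forms
-- ===== SOURCE B (Python) =====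
-- def find_forms(html):
--     # Consume the string: instead of tracking an absolute position into the
--     # full string, repeatedly cut off everything up to and including the form
--     # just emitted and restart the search on the remaining suffix.
--     out = []
--     orig = html
--     low = html.lower()
--     while True:
--         i = low.find("<form")
--         if i == -1:
--             return out
--         j = low.find(">", i)
--         if j == -1:
--             return out
--         k = low.find("</form>", j)
--         cut = j + 1 if k == -1 else k + 7
--         out.append(orig[i:cut])
--         orig = orig[cut:]
--         low = low[cut:]
-- ===== Notes on version B (the rewrite author's own statement) =====
-- stated objective: alternative
-- what changed: A tracks an absolute position into the whole string and searches from it; B consumes the input, slicing off the processed prefix each round so every search runs from index 0 of the remaining suffix and no position bookkeeping survives between rounds.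
import Mathlib
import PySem

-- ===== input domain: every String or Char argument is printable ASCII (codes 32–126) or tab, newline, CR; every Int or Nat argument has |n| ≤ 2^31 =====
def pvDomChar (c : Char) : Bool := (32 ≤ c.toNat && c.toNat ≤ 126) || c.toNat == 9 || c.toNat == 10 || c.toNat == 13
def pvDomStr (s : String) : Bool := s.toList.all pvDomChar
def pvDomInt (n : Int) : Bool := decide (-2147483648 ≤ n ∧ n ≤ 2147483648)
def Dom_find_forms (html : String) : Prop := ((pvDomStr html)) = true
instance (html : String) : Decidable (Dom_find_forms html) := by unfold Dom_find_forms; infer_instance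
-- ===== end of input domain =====

-- B replaces A's absolute-position bookkeeping by consuming the input: each round slices off
-- everything through the emitted form and restarts the search on the remaining suffix
-- (objective: alternative decomposition; same return value, no side effects involved).

-- ===== PORT A =====
-- A's while-loop: an absolute position `pos` into the fixed strings, forms accumulated by
-- append.  The loop advances `pos` by at least 1 per iteration and stops once past the end,
-- so fuel = len(low)+1 is a pure totality guard (proved adequate implicitly by pvMain).
def findFormsALoop (html low : List Char) : Nat → Nat → List (List Char) → List (List Char)
  | 0, _, forms => forms
  | fuel + 1, pos, forms =>
    let idx := PySem.Chars.findFrom low "<form".toList (pos : Int)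
    if idx = -1 then forms
    else
      let e := PySem.Chars.findFrom low ">".toList idx
      if e = -1 then forms
      else
        let close := PySem.Chars.findFrom low "</form>".toList e
        if close = -1 then
          findFormsALoop html low fuel (e.toNat + 1)
            (forms ++ [PySem.List.slice html (some idx) (some (e + 1))])
        else
          findFormsALoop html low fuel (close.toNat + 7)
            (forms ++ [PySem.List.slice html (some idx) (some (close + 7))])

def find_forms (html : String) : List String :=
  (findFormsALoop html.toList (PySem.Chars.lower html.toList)
    ((PySem.Chars.lower html.toList).length + 1) 0 []).map String.ofList

-- ===== PORT B =====
-- B's loop, as the recursion it is: no position, the processed prefix is cut away and the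
-- search restarts on the remaining suffix; results are built front-to-back by cons.  Each
-- round removes at least one character, so fuel = len(low)+1 is a pure totality guard.
def findFormsBGo : Nat → List Char → List Char → List (List Char)
  | 0, _, _ => []
  | fuel + 1, orig, low =>
    let i := PySem.Chars.find low "<form".toList
    if i = -1 then []
    else
      let j := PySem.Chars.findFrom low ">".toList i
      if j = -1 then []
      else
        let k := PySem.Chars.findFrom low "</form>".toList j
        let cut := if k = -1 then j + 1 else k + 7
        PySem.List.slice orig (some i) (some cut) ::
          findFormsBGo fuel (PySem.List.slice orig (some cut) none)
            (PySem.List.slice low (some cut) none)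

def find_forms_alt (html : String) : List String :=
  (findFormsBGo ((PySem.Chars.lower html.toList).length + 1) html.toList
    (PySem.Chars.lower html.toList)).map String.ofList

-- ===== PRECONDITION & SPEC =====
def Spec_find_forms (html : String) (out : List String) : Prop := out = find_forms_alt html
instance (html : String) (out : List String) : Decidable (Spec_find_forms html out) := by unfold Spec_find_forms; infer_instance

-- ===== CLAIM (what is proved, stated in full; the proofs are below) =====
def Claim_equal_find_forms : Prop := ∀ (html : String), Dom_find_forms html → Spec_find_forms html (find_forms html)

-- ===== LEMMAS AND PROOFS =====

-- helper facts about Python's str.find(sub, start) (used by the equivalence proof)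
theorem pvFindFrom_neg_of_gt (s sub : List Char) {p : Nat} (h : s.length < p) :
    PySem.Chars.findFrom s sub (p : Int) = -1 := by
  simp only [PySem.Chars.findFrom]
  split_ifs <;> omega

theorem pvFindFrom_le (s sub : List Char) {x : Int} (h0 : 0 ≤ x) (hx : x ≤ (s.length : Int))
    (hsub : sub ≠ []) (h : PySem.Chars.findFrom s sub x ≠ -1) :
    x ≤ PySem.Chars.findFrom s sub x ∧
      (PySem.Chars.findFrom s sub x).toNat + sub.length ≤ s.length := by
  have hx' : x = ((x.toNat : Nat) : Int) := by omega
  rw [hx'] at h ⊢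
  obtain ⟨h1, h2, -⟩ := PySem.Chars.findFrom_natCast_spec s sub x.toNat (by omega) h
  refine ⟨h1, ?_⟩
  have hlen := h2.length_le
  have hpos : 0 < sub.length := List.length_pos_iff.mpr hsub
  simp only [List.length_drop] at hlen
  omega


theorem pvFindFrom_shift (s sub : List Char) (p q : Nat) (hpq : p + q ≤ s.length) :
    PySem.Chars.findFrom s sub ((p + q : Nat) : Int) =
      if PySem.Chars.findFrom (s.drop p) sub (q : Int) = -1 then -1
      else (p : Int) + PySem.Chars.findFrom (s.drop p) sub (q : Int) := by
  rw [PySem.Chars.findFrom_natCast s sub (p + q) hpq,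
      PySem.Chars.findFrom_natCast (s.drop p) sub q (by simp only [List.length_drop]; omega),
      List.drop_drop]
  have hm := PySem.Chars.neg_one_le_find (List.drop (p + q) s) sub
  split_ifs <;> push_cast <;> omega

theorem pvSlice_drop {α : Type} (xs : List α) (p a b : Nat) :
    PySem.List.slice xs (some ((p + a : Nat) : Int)) (some ((p + b : Nat) : Int)) =
      PySem.List.slice (xs.drop p) (some (a : Int)) (some (b : Int)) := by
  rw [PySem.List.slice_natCast, PySem.List.slice_natCast, List.drop_drop,
      show p + b - (p + a) = b - a from by omega]

theorem pvBGo_nil (fuel : Nat) (orig : List Char) : findFormsBGo fuel orig [] = [] := by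
  have hfind : PySem.Chars.find [] ['<','f','o','r','m'] = -1 := by decide
  cases fuel with
  | zero => simp [findFormsBGo]
  | succ fuel => simp [findFormsBGo, hfind]

theorem pvMain (fuel : Nat) : ∀ (orig low : List Char) (pos : Nat) (forms : List (List Char)),
    findFormsALoop orig low fuel pos forms
      = forms ++ findFormsBGo fuel (orig.drop pos) (low.drop pos) := by
  induction fuel with
  | zero =>
    intro orig low pos forms
    simp [findFormsALoop, findFormsBGo]
  | succ fuel ih =>
    intro orig low pos forms
    by_cases hp' : low.length < pos
    · have hA := pvFindFrom_neg_of_gt low ['<','f','o','r','m'] (p := pos) (by omega)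
      rw [List.drop_eq_nil_of_le (show low.length ≤ pos from by omega), pvBGo_nil]
      simp only [findFormsALoop]
      simp [hA]
    · rw [not_lt] at hp'
      simp only [findFormsALoop, findFormsBGo]
      simp only [show "<form".toList = ['<','f','o','r','m'] from rfl,
                 show ">".toList = ['>'] from rfl,
                 show "</form>".toList = ['<','/','f','o','r','m','>'] from rfl]
      have hidxeq := PySem.Chars.findFrom_natCast low ['<','f','o','r','m'] pos hp'
      set F := PySem.Chars.find (List.drop pos low) ['<','f','o','r','m'] with hFdef
      by_cases hF : F = -1
      · simp [hidxeq, hF]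
      · have hF0 : 0 ≤ F := by
          have := PySem.Chars.neg_one_le_find (List.drop pos low) ['<','f','o','r','m']
          rw [← hFdef] at this; omega
        have hFlen : F.toNat + 5 ≤ low.length - pos := by
          obtain ⟨hpre, -⟩ := PySem.Chars.find_spec (s := List.drop pos low)
            (sub := ['<','f','o','r','m']) (by rw [← hFdef]; exact hF0)
          have hh := hpre.length_le
          have h3 : (['<','f','o','r','m'] : List Char).length = 5 := rfl
          rw [← hFdef] at hh
          rw [List.length_drop, List.length_drop] at hh
          omega
        rw [hidxeq]
        simp only [if_neg hF]
        rw [if_neg (show ¬((pos : Int) + F = -1) from by omega)]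
        rw [show ((pos : Int) + F) = ((pos + F.toNat : Nat) : Int) from by push_cast; omega]
        rw [pvFindFrom_shift low ['>'] pos F.toNat (by omega)]
        rw [show ((F.toNat : Nat) : Int) = F from by omega]
        set J := PySem.Chars.findFrom (List.drop pos low) ['>'] F with hJdef
        by_cases hJ : J = -1
        · simp [hJ]
        · obtain ⟨hc, hd⟩ := pvFindFrom_le (List.drop pos low) ['>'] (x := F)
            (by omega) (by simp only [List.length_drop]; omega) (by decide)
            (by rw [← hJdef]; exact hJ)
          rw [← hJdef] at hc hd
          simp only [List.length_drop] at hd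
          simp only [if_neg hJ]
          rw [if_neg (show ¬((pos : Int) + J = -1) from by omega)]
          rw [show ((pos : Int) + J) = ((pos + J.toNat : Nat) : Int) from by push_cast; omega]
          rw [pvFindFrom_shift low ['<','/','f','o','r','m','>'] pos J.toNat (by omega)]
          rw [show ((J.toNat : Nat) : Int) = J from by omega]
          set K := PySem.Chars.findFrom (List.drop pos low) ['<','/','f','o','r','m','>'] J
            with hKdef
          by_cases hK : K = -1
          · simp only [hK, reduceIte]
            rw [show ((pos + J.toNat : Nat) : Int).toNat + 1 = pos + (J.toNat + 1) from by omega]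
            rw [show ((pos + J.toNat : Nat) : Int) + 1 = ((pos + (J.toNat + 1) : Nat) : Int)
              from by push_cast; omega]
            rw [pvSlice_drop orig pos F.toNat (J.toNat + 1)]
            rw [show ((F.toNat : Nat) : Int) = F from by omega]
            rw [show ((J.toNat + 1 : Nat) : Int) = J + 1 from by push_cast; omega]
            rw [PySem.List.slice_from (List.drop pos orig) (show (0:Int) ≤ J + 1 from by omega),
                PySem.List.slice_from (List.drop pos low) (show (0:Int) ≤ J + 1 from by omega)]
            rw [show (J + 1).toNat = J.toNat + 1 from by omega]
            rw [List.drop_drop, List.drop_drop]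
            rw [ih orig low (pos + (J.toNat + 1)) _]
            simp
          · obtain ⟨he, hf⟩ := pvFindFrom_le (List.drop pos low) ['<','/','f','o','r','m','>']
              (x := J) (by omega) (by simp only [List.length_drop]; omega) (by decide)
              (by rw [← hKdef]; exact hK)
            rw [← hKdef] at he hf
            simp only [List.length_drop] at hf
            simp only [if_neg hK]
            rw [if_neg (show ¬((pos : Int) + K = -1) from by omega)]
            rw [show ((pos : Int) + K).toNat + 7 = pos + (K.toNat + 7) from by omega]
            rw [show ((pos : Int) + K) + 7 = ((pos + (K.toNat + 7) : Nat) : Int)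
              from by push_cast; omega]
            rw [pvSlice_drop orig pos F.toNat (K.toNat + 7)]
            rw [show ((F.toNat : Nat) : Int) = F from by omega]
            rw [show ((K.toNat + 7 : Nat) : Int) = K + 7 from by push_cast; omega]
            rw [PySem.List.slice_from (List.drop pos orig) (show (0:Int) ≤ K + 7 from by omega),
                PySem.List.slice_from (List.drop pos low) (show (0:Int) ≤ K + 7 from by omega)]
            rw [show (K + 7).toNat = K.toNat + 7 from by omega]
            rw [List.drop_drop, List.drop_drop]
            rw [ih orig low (pos + (K.toNat + 7)) _]
            simp

-- ===== VERDICT (by name: the statement is the Claim_ definition above) =====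
theorem find_forms_spec : Claim_equal_find_forms := by
  intro html _
  unfold Spec_find_forms find_forms find_forms_alt
  have := pvMain ((PySem.Chars.lower html.toList).length + 1) html.toList
    (PySem.Chars.lower html.toList) 0 []
  simp only [List.drop_zero, List.nil_append] at this
  rw [this]
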